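-- pv_equiv track=rewrite | github.com/IanMack-uk/nps-proof-pipeline | src/nps/math/locality.py | line_graph_neighbors_from_edge_incidence
-- ===== SOURCE A (Python) =====
-- def line_graph_neighbors_from_edge_incidence(edges: list[tuple[int, int]]) -> list[list[int]]:
--     """Compute line-graph adjacency of edges.
--
--     Two edges are neighbors if they share an endpoint.
--     """
--
--     m = len(edges)
--     neighbors: list[list[int]] = [[] for _ in range(m)]
--
--     endpoint_to_edges: dict[int, list[int]] = {}
--     for ei, (u, v) in enumerate(edges):
--         endpoint_to_edges.setdefault(u, []).append(ei)
--         endpoint_to_edges.setdefault(v, []).append(ei)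
--
--     for ei, (u, v) in enumerate(edges):
--         adj = set(endpoint_to_edges.get(u, [])) | set(endpoint_to_edges.get(v, []))
--         adj.discard(ei)
--         neighbors[ei] = sorted(adj)
--
--     return neighbors
-- ===== SOURCE B (Python) =====
-- def line_graph_neighbors_from_edge_incidence(edges: list[tuple[int, int]]) -> list[list[int]]:
--     """Brute-force pairwise scan: no incidence map, no sets, no sorting —
--     for each edge just collect, in index order, every other edge sharing an endpoint."""
--     m = len(edges)
--     out: list[list[int]] = []
--     for ei in range(m):
--         u, v = edges[ei]
--         out.append([ej for ej in range(m)
--                     if ej != ei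
--                     and (edges[ej][0] == u or edges[ej][0] == v
--                          or edges[ej][1] == u or edges[ej][1] == v)])
--     return out
-- ===== Notes on version B (the rewrite author's own statement) =====
-- stated objective: alternative
-- what changed: Replaced A's endpoint-to-edges incidence dict plus per-edge set union, discard and sort by a direct quadratic pairwise scan: for each edge, filter all edge indices in increasing order for a shared endpoint (no dict, no sets, no sorting).
import Mathlib
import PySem

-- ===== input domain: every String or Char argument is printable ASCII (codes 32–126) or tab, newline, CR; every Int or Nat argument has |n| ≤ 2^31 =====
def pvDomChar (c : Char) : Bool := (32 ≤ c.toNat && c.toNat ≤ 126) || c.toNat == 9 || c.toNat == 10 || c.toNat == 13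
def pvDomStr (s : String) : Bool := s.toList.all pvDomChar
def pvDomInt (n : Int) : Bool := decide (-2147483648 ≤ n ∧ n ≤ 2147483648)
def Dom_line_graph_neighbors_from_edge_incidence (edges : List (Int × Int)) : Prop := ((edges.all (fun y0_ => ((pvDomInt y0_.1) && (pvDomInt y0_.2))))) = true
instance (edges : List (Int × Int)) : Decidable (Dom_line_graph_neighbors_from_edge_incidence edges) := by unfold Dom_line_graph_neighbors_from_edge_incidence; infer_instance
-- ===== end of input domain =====

-- B replaces A's endpoint→edges incidence dict and per-edge set union/sort by a plain
-- quadratic pairwise scan over edge indices (alternative decomposition; no speed claim).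

-- ===== PORT A =====
def line_graph_neighbors_from_edge_incidence (edges : List (Int × Int)) : List (List Int) :=
  let m := edges.length
  -- neighbors: list[list[int]] = [[] for _ in range(m)]
  let neighbors : List (List Int) := (List.range m).map (fun _ => ([] : List Int))
  -- setdefault(u, []).append(ei) twice per edge = Dict.modify with default [] appending ei
  let e2e : PySem.Dict Int (List Int) :=
    (PySem.List.enumerate edges 0).foldl
      (fun d p => ((d.modify p.2.1 [] (· ++ [p.1])).modify p.2.2 [] (· ++ [p.1])))
      PySem.Dict.empty
  -- second loop: adj = set(get(u,[])) | set(get(v,[])); adj.discard(ei); neighbors[ei] = sorted(adj)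
  (PySem.List.enumerate edges 0).foldl
    (fun nb p =>
      let adj := PySem.Set.discard
        (PySem.Set.union (PySem.Set.ofList (e2e.getD p.2.1 []))
                         (PySem.Set.ofList (e2e.getD p.2.2 []))) p.1
      PySem.List.pySetD nb p.1 (PySem.List.sorted adj (fun x => x) false))
    neighbors

-- ===== PORT B =====
def line_graph_neighbors_from_edge_incidence_alt (edges : List (Int × Int)) : List (List Int) :=
  let m : Int := PySem.List.len edges
  (PySem.List.pyRange 0 m 1).map (fun ei =>
    let e := PySem.List.pyGetD edges ei (0, 0)
    (PySem.List.pyRange 0 m 1).filter (fun ej =>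
      decide (ej ≠ ei) &&
        (let f := PySem.List.pyGetD edges ej (0, 0)
         (f.1 == e.1 || f.1 == e.2 || f.2 == e.1 || f.2 == e.2))))

-- ===== PRECONDITION & SPEC =====
def Spec_line_graph_neighbors_from_edge_incidence (edges : List (Int × Int)) (out : List (List Int)) : Prop := out = line_graph_neighbors_from_edge_incidence_alt edges
instance (edges : List (Int × Int)) (out : List (List Int)) : Decidable (Spec_line_graph_neighbors_from_edge_incidence edges out) := by unfold Spec_line_graph_neighbors_from_edge_incidence; infer_instance

-- ===== CLAIM (what is proved, stated in full; the proofs are below) =====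
def Claim_equal_line_graph_neighbors_from_edge_incidence : Prop := ∀ (edges : List (Int × Int)), Dom_line_graph_neighbors_from_edge_incidence edges → Spec_line_graph_neighbors_from_edge_incidence edges (line_graph_neighbors_from_edge_incidence edges)

-- ===== LEMMAS AND PROOFS =====

theorem pvTwoModify (l : List (Int × (Int × Int))) (d : PySem.Dict Int (List Int)) :
    l.foldl (fun d p => ((d.modify p.2.1 [] (· ++ [p.1])).modify p.2.2 [] (· ++ [p.1]))) d
      = (l.flatMap (fun p => [(p.2.1, p.1), (p.2.2, p.1)])).foldl
          (fun d q => d.modify q.1 ([] : List Int) (· ++ [q.2])) d := by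
  induction l generalizing d with
  | nil => rfl
  | cons p t ih => simp [List.flatMap_cons, ih]

theorem pvMemE2E (edges : List (Int × Int)) (x c : Int) :
    (c ∈ ((PySem.List.enumerate edges 0).foldl
      (fun d p => ((d.modify p.2.1 [] (· ++ [p.1])).modify p.2.2 [] (· ++ [p.1])))
      (PySem.Dict.empty : PySem.Dict Int (List Int))).getD x []) ↔
    ∃ (k : Nat), ∃ (h : k < edges.length), c = (k : Int) ∧ ((edges[k]).1 = x ∨ (edges[k]).2 = x) := by
  rw [pvTwoModify, PySem.Dict.getD_foldl_modify_append]
  simp only [PySem.Dict.getD_empty, List.nil_append, List.mem_map, List.mem_filter,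
    List.mem_flatMap, PySem.List.mem_enumerate_iff]
  constructor
  · rintro ⟨q, ⟨⟨p, ⟨k, hk, rfl⟩, hq⟩, hb⟩, rfl⟩
    simp only [List.mem_cons, List.not_mem_nil, or_false] at hq
    have hb' := beq_iff_eq.mp hb
    refine ⟨k, hk, ?_, ?_⟩
    · rcases hq with h | h <;> simp [h]
    · rcases hq with h | h <;> rw [h] at hb' <;> simp at hb' <;> [left; right] <;> exact hb'
  · rintro ⟨k, hk, rfl, huv⟩
    rcases huv with h1 | h2
    · refine ⟨((edges[k]).1, (k : Int)), ⟨⟨((0 : Int) + (k : Int), edges[k]), ⟨k, hk, rfl⟩, by simp⟩, by simpa using h1⟩, rfl⟩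
    · refine ⟨((edges[k]).2, (k : Int)), ⟨⟨((0 : Int) + (k : Int), edges[k]), ⟨k, hk, rfl⟩, by simp⟩, by simpa using h2⟩, rfl⟩

theorem pvRow (edges : List (Int × Int)) (ei : Int) (hlo : 0 ≤ ei) (hhi : ei < (edges.length : Int)) :
    PySem.List.sorted
        (PySem.Set.discard
          (PySem.Set.union
            (PySem.Set.ofList (((PySem.List.enumerate edges 0).foldl
              (fun d p => ((d.modify p.2.1 [] (· ++ [p.1])).modify p.2.2 [] (· ++ [p.1])))
              (PySem.Dict.empty : PySem.Dict Int (List Int))).getD (PySem.List.pyGetD edges ei (0, 0)).1 []))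
            (PySem.Set.ofList (((PySem.List.enumerate edges 0).foldl
              (fun d p => ((d.modify p.2.1 [] (· ++ [p.1])).modify p.2.2 [] (· ++ [p.1])))
              (PySem.Dict.empty : PySem.Dict Int (List Int))).getD (PySem.List.pyGetD edges ei (0, 0)).2 []))) ei)
        (fun x => x) false
      = (PySem.List.pyRange 0 (edges.length : Int) 1).filter (fun ej =>
          decide (ej ≠ ei) &&
            ((PySem.List.pyGetD edges ej (0, 0)).1 == (PySem.List.pyGetD edges ei (0, 0)).1 ||
             (PySem.List.pyGetD edges ej (0, 0)).1 == (PySem.List.pyGetD edges ei (0, 0)).2 ||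
             (PySem.List.pyGetD edges ej (0, 0)).2 == (PySem.List.pyGetD edges ei (0, 0)).1 ||
             (PySem.List.pyGetD edges ej (0, 0)).2 == (PySem.List.pyGetD edges ei (0, 0)).2)) := by
  apply PySem.List.sorted_eq_of_perm_of_pairwise_lt
  · rw [List.perm_ext_iff_of_nodup
      (List.Nodup.filter _ (PySem.List.nodup_pyRange_one 0 _))
      (PySem.Set.nodup_discard _ _ (PySem.Set.nodup_union _ _ (PySem.Set.nodup_ofList _)))]
    intro c
    simp only [List.mem_filter, PySem.List.mem_pyRange_one, PySem.Set.mem_discard,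
      PySem.Set.mem_union, PySem.Set.mem_ofList, pvMemE2E, Bool.and_eq_true, decide_eq_true_eq,
      Bool.or_eq_true, beq_iff_eq]
    constructor
    · rintro ⟨⟨h0, hm⟩, hne, hc⟩
      have hgc : PySem.List.pyGetD edges c (0,0) = edges[c.toNat]'(by omega) := by
        rw [PySem.List.pyGetD_eq_getElem] <;> omega
      rw [hgc] at hc
      refine ⟨?_, hne⟩
      rcases hc with ((h | h) | h) | h
      · exact Or.inl ⟨c.toNat, by omega, by omega, Or.inl h⟩
      · exact Or.inr ⟨c.toNat, by omega, by omega, Or.inl h⟩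
      · exact Or.inl ⟨c.toNat, by omega, by omega, Or.inr h⟩
      · exact Or.inr ⟨c.toNat, by omega, by omega, Or.inr h⟩
    · rintro ⟨h, hne⟩
      rcases h with ⟨k, hk, rfl, hk2⟩ | ⟨k, hk, rfl, hk2⟩ <;>
      · have hgc : PySem.List.pyGetD edges ((k : Nat) : Int) (0,0) = edges[k] := by
          rw [PySem.List.pyGetD_eq_getElem] <;> simp [hk]
        refine ⟨⟨Int.natCast_nonneg k, by exact_mod_cast hk⟩, hne, ?_⟩
        rw [hgc]; tauto
  · exact List.Pairwise.filter _ (PySem.List.pairwise_lt_pyRange_one 0 _)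

theorem pvFill {α β : Type} (xs : List α) (g : Int × α → β) :
    ∀ (pre : List β) (ys : List β), ys.length = xs.length →
    (PySem.List.enumerate xs (pre.length : Int)).foldl
        (fun nb p => PySem.List.pySetD nb p.1 (g p)) (pre ++ ys)
      = pre ++ (PySem.List.enumerate xs (pre.length : Int)).map g := by
  induction xs with
  | nil => intro pre ys h; simp at h; simp [h, PySem.List.enumerate_nil]
  | cons x t ih =>
    intro pre ys h
    cases ys with
    | nil => simp at h
    | cons y ys' =>
      rw [PySem.List.enumerate_cons]
      simp only [List.foldl_cons, List.map_cons]
      have hset : PySem.List.pySetD (pre ++ y :: ys') ((pre.length : Int)) (g ((pre.length : Int), x))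
          = pre ++ g ((pre.length : Int), x) :: ys' := by
        have hlt : pre.length < (pre ++ y :: ys').length := by simp
        rw [PySem.List.pySetD, PySem.List.pySet?_natCast _ _ _ hlt]
        simp
      rw [hset]
      have hlen : ys'.length = t.length := by simpa using h
      have := ih (pre ++ [g ((pre.length : Int), x)]) ys' hlen
      simp only [List.length_append, List.length_cons, List.length_nil] at this ⊢
      rw [List.append_assoc, List.singleton_append] at this
      have hcast : ((pre.length : Int) + 1) = (((pre.length + 1 : Nat)) : Int) := by push_cast; ring
      rw [hcast, this, List.append_assoc, List.singleton_append]

-- ===== VERDICT (by name: the statement is the Claim_ definition above) =====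
theorem line_graph_neighbors_from_edge_incidence_spec : Claim_equal_line_graph_neighbors_from_edge_incidence := by
  intro edges _
  show _ = _
  unfold line_graph_neighbors_from_edge_incidence line_graph_neighbors_from_edge_incidence_alt
  have hfill := pvFill (β := List Int) edges
    (fun p => PySem.List.sorted
      (PySem.Set.discard
        (PySem.Set.union
          (PySem.Set.ofList (((PySem.List.enumerate edges 0).foldl
            (fun d q => ((d.modify q.2.1 [] (· ++ [q.1])).modify q.2.2 [] (· ++ [q.1])))
            PySem.Dict.empty).getD p.2.1 []))
          (PySem.Set.ofList (((PySem.List.enumerate edges 0).foldl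
            (fun d q => ((d.modify q.2.1 [] (· ++ [q.1])).modify q.2.2 [] (· ++ [q.1])))
            PySem.Dict.empty).getD p.2.2 []))) p.1) (fun x => x) false)
    [] ((List.range edges.length).map (fun _ => ([] : List Int))) (by simp)
  simp only [List.length_nil, Nat.cast_zero, List.nil_append] at hfill
  rw [hfill]
  simp only [PySem.List.len_eq]
  apply List.ext_getElem
  · simp
  · intro k h1 h2
    have hk : k < edges.length := by simpa using h2
    simp only [List.getElem_map, PySem.List.getElem_enumerate, PySem.List.getElem_pyRange_one]
    have hg : PySem.List.pyGetD edges ((k : Nat) : Int) ((0 : Int), (0 : Int)) = edges[k] := by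
      rw [PySem.List.pyGetD_eq_getElem] <;> simp [hk]
    have hrow := pvRow edges ((k : Nat) : Int) (Int.natCast_nonneg k) (by exact_mod_cast hk)
    rw [hg] at hrow
    simpa [hg] using hrow
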